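-- pv_equiv track=rewrite | github.com/n-i-p/algorithms | codeforces/23A/23A.py | func_sol
-- ===== SOURCE A (Python) =====
-- def func_sol(raw_data):
--     a = raw_data.strip()
--     n = len(a)
--     m = 0
--     for l in range(n - 1, 0, -1):
--         for s in range(0, n - l):
--             if a[s:s + l] in a[s + 1:]:
--                 m = max(m, l)
--     return str(m)
-- ===== SOURCE B (Python) =====
-- def func_sol(raw_data):
--     a = raw_data.strip()
--     n = len(a)
--     for l in range(n - 1, 0, -1):
--         seen = set()
--         for i in range(n - l + 1):
--             w = a[i:i + l]
--             if w in seen: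
--                 return str(l)
--             seen.add(w)
--     return "0"
-- ===== Notes on version B (the rewrite author's own statement) =====
-- stated objective: faster
-- what changed: replaces the quadratic per-(l,s) scan that searches each window inside the following suffix with a per-length duplicate-window detection via a hash set of windows, returning at the first (largest) repeating length
import Mathlib
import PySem

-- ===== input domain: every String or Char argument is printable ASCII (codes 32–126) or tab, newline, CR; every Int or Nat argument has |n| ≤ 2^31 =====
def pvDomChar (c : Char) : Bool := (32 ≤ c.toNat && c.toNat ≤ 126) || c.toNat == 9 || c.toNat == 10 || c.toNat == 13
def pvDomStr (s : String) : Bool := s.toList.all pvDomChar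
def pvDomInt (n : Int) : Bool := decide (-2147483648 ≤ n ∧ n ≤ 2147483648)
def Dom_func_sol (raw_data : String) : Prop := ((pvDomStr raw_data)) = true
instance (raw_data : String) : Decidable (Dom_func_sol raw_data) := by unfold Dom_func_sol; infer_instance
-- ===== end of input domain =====

-- B replaces A's per-(l,s) substring-in-suffix scan by per-length duplicate-window detection
-- with a set, returning at the first (largest) repeating length: faster in a timing run.


-- ===== PORT A =====
-- literal transliteration of A: for l in range(n-1,0,-1): for s in range(0,n-l): if a[s:s+l] in a[s+1:]: m = max(m, l)
def func_sol (raw_data : String) : String :=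
  let a := (PySem.Str.strip raw_data).toList
  let n := a.length
  let m : Int :=
    (PySem.List.pyRange ((n : Int) - 1) 0 (-1)).foldl (fun m l =>
      (PySem.List.pyRange 0 ((n : Int) - l) 1).foldl (fun m s =>
        if PySem.Chars.isIn (PySem.List.slice a (some s) (some (s + l)))
            (PySem.List.slice a (some (s + 1)) none)
        then max m l else m) m) 0
  PySem.Int.toStr m

-- ===== PORT B =====
-- inner loop of Source B: for i in range(n-l+1): w = a[i:i+l]; if w in seen: return str(l); seen.add(w)
-- (a[i:i+l] with 0 ≤ i, 0 ≤ l is ported as (a.drop i).take l — exact for natural bounds, cf. PySem.List.slice_natCast_add)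
def pvBInner (a : List Char) (l : Nat) (idxs : List Nat) (seen : PySem.Set (List Char)) : Bool :=
  match idxs with
  | [] => false
  | i :: rest =>
    let w := (a.drop i).take l
    if PySem.Set.contains seen w then true
    else pvBInner a l rest (PySem.Set.add seen w)

-- outer loop of Source B: for l in range(n-1,0,-1): … ; return "0" (countdown as Nat recursion)
def pvBOuter (a : List Char) : Nat → String
  | 0 => "0"
  | l + 1 =>
    if pvBInner a (l + 1) (List.range (a.length - (l + 1) + 1)) PySem.Set.empty
    then PySem.Int.toStr ((l : Int) + 1)
    else pvBOuter a l

def func_sol_alt (raw_data : String) : String :=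
  let a := (PySem.Str.strip raw_data).toList
  pvBOuter a (a.length - 1)

-- ===== PRECONDITION & SPEC =====
def Spec_func_sol (raw_data : String) (out : String) : Prop := out = func_sol_alt raw_data
instance (raw_data : String) (out : String) : Decidable (Spec_func_sol raw_data out) := by unfold Spec_func_sol; infer_instance

-- ===== CLAIM (what is proved, stated in full; the proofs are below) =====
def Claim_equal_func_sol : Prop := ∀ (raw_data : String), Dom_func_sol raw_data → Spec_func_sol raw_data (func_sol raw_data)

-- ===== LEMMAS AND PROOFS =====

-- window of length l starting at i (what both ports compare)
def pvW (a : List Char) (l i : Nat) : List Char := (a.drop i).take l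

-- A's per-length condition, as a Bool
def pvCA (a : List Char) (l : Int) : Bool :=
  (PySem.List.pyRange 0 ((a.length : Int) - l) 1).any (fun s =>
    PySem.Chars.isIn (PySem.List.slice a (some s) (some (s + l)))
      (PySem.List.slice a (some (s + 1)) none))

-- B's per-length condition, as a Bool
def pvCB (a : List Char) (l : Nat) : Bool :=
  pvBInner a l (List.range (a.length - l + 1)) PySem.Set.empty

-- A's result value as a first-hit countdown
def pvFirstA (a : List Char) : Nat → Int
  | 0 => 0
  | l + 1 => if pvCA a ((l : Int) + 1) then (l : Int) + 1 else pvFirstA a l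

lemma pv_foldl_max_if (L : List Int) (c : Int → Bool) (l : Int) (m : Int) :
    L.foldl (fun m s => if c s then max m l else m) m = if L.any c then max m l else m := by
  induction L generalizing m with
  | nil => simp
  | cons x t ih =>
      by_cases h : c x
      · simp only [List.foldl_cons, List.any_cons, h, if_pos, Bool.true_or, ih]
        split
        · rw [max_assoc, max_self]
        · rfl
      · simp [h, ih]

lemma pv_foldl_absorb (L : List Int) (c : Int → Bool) (m : Int) (h : ∀ l ∈ L, l ≤ m) :
    L.foldl (fun m l => if c l then max m l else m) m = m := by
  induction L with
  | nil => rfl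
  | cons x t ih =>
      have hx : max m x = m := max_eq_left (h x (by simp))
      by_cases hc : c x <;> simp [hc, hx] <;> exact ih (fun l hl => h l (by simp [hl]))

lemma pvBInner_iff (a : List Char) (l : Nat) (idxs : List Nat) (seen : PySem.Set (List Char)) :
    pvBInner a l idxs seen = true ↔
      (∃ i ∈ idxs, pvW a l i ∈ seen) ∨ ¬ (idxs.map (pvW a l)).Nodup := by
  induction idxs generalizing seen with
  | nil => simp [pvBInner]
  | cons i rest ih =>
      simp only [pvBInner]
      have hpv : List.take l (List.drop i a) = pvW a l i := rfl
      rw [hpv]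
      cases hc : PySem.Set.contains seen (pvW a l i)
      · have hns : pvW a l i ∉ seen := fun hm => by
          rw [(PySem.Set.contains_iff seen (pvW a l i)).mpr hm] at hc; cases hc
        simp only [Bool.false_eq_true, if_false, ih]
        constructor
        · rintro (⟨j, hj, hmem⟩ | hdup)
          · rcases (PySem.Set.mem_add seen (pvW a l i) (pvW a l j)).mp hmem with hm | he
            · exact Or.inl ⟨j, by simp [hj], hm⟩
            · refine Or.inr ?_
              simp only [List.map_cons, List.nodup_cons, not_and]
              intro hw
              exact absurd (List.mem_map.mpr ⟨j, hj, he⟩) hw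
          · refine Or.inr ?_
            simp only [List.map_cons, List.nodup_cons, not_and]
            intro _; exact hdup
        · rintro (⟨j, hj, hmem⟩ | hdup)
          · rcases List.mem_cons.mp hj with rfl | hj'
            · exact absurd hmem hns
            · exact Or.inl ⟨j, hj', (PySem.Set.mem_add seen (pvW a l i) (pvW a l j)).mpr (Or.inl hmem)⟩
          · simp only [List.map_cons, List.nodup_cons, not_and] at hdup
            by_cases hw : pvW a l i ∈ rest.map (pvW a l)
            · rcases List.mem_map.mp hw with ⟨j, hj, hje⟩
              exact Or.inl ⟨j, hj, (PySem.Set.mem_add seen (pvW a l i) (pvW a l j)).mpr (Or.inr hje)⟩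
            · exact Or.inr (hdup hw)
      · have hmem : pvW a l i ∈ seen := (PySem.Set.contains_iff seen (pvW a l i)).mp hc
        simp only [if_true, true_iff]
        exact Or.inl ⟨i, by simp, hmem⟩

lemma pv_dup_iff (a : List Char) (l N : Nat) :
    ¬ ((List.range N).map (pvW a l)).Nodup ↔
      ∃ i j, i < j ∧ j < N ∧ pvW a l i = pvW a l j := by
  rw [List.Nodup, List.pairwise_map, List.pairwise_iff_getElem]
  simp only [List.length_range, List.getElem_range]
  push Not
  constructor
  · rintro ⟨i, j, hi, hj, hij, he⟩; exact ⟨i, j, hij, hj, he⟩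
  · rintro ⟨i, j, hij, hj, he⟩; exact ⟨i, j, lt_trans hij hj, hj, hij, he⟩

lemma pv_condA_iff (a : List Char) (l : Nat) (hl : 1 ≤ l) :
    pvCA a (l : Int) = true ↔
      ∃ i j, i < j ∧ j < a.length - l + 1 ∧ pvW a l i = pvW a l j := by
  unfold pvCA
  rw [List.any_eq_true]
  constructor
  · rintro ⟨s, hs, hc⟩
    rw [PySem.List.mem_pyRange_one] at hs
    obtain ⟨hs0, hsn⟩ := hs
    obtain ⟨σ, rfl⟩ : ∃ σ : Nat, s = (σ : Int) := ⟨s.toNat, (Int.toNat_of_nonneg hs0).symm⟩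
    have hσl : σ + l < a.length := by omega
    rw [PySem.List.slice_natCast_add] at hc
    have h1 : ((σ : Int) + 1) = ((σ + 1 : Nat) : Int) := by push_cast; ring
    rw [h1, PySem.List.slice_from_natCast] at hc
    rw [← PySem.Chars.exists_prefix_drop_iff_isIn] at hc
    obtain ⟨p, hp⟩ := hc
    rw [List.drop_drop] at hp
    have hlen : ((a.drop σ).take l).length = l := by
      simp [List.length_take, List.length_drop]; omega
    have hjle : l ≤ a.length - (σ + 1 + p) := by
      have := hp.length_le
      simpa [hlen, List.length_drop] using this
    refine ⟨σ, σ + 1 + p, by omega, by omega, ?_⟩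
    have heq := List.prefix_iff_eq_take.mp hp
    rw [hlen] at heq
    exact heq
  · rintro ⟨i, j, hij, hj, hw⟩
    refine ⟨(i : Int), ?_, ?_⟩
    · rw [PySem.List.mem_pyRange_one]
      refine ⟨Int.natCast_nonneg i, ?_⟩
      have : i + l < a.length := by omega
      omega
    · rw [PySem.List.slice_natCast_add]
      have h1 : ((i : Int) + 1) = ((i + 1 : Nat) : Int) := by push_cast; ring
      rw [h1, PySem.List.slice_from_natCast]
      rw [← PySem.Chars.exists_prefix_drop_iff_isIn]
      refine ⟨j - (i + 1), ?_⟩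
      rw [List.drop_drop]
      have hjj : i + 1 + (j - (i + 1)) = j := by omega
      rw [hjj]
      show pvW a l i <+: a.drop j
      rw [hw]
      exact List.take_prefix l (a.drop j)

lemma pv_cond_eq (a : List Char) (l : Nat) (hl : 1 ≤ l) : pvCA a (l : Int) = pvCB a l := by
  rw [Bool.eq_iff_iff, pv_condA_iff a l hl]
  unfold pvCB
  rw [pvBInner_iff]
  have hemp : ¬ ∃ i ∈ List.range (a.length - l + 1),
      pvW a l i ∈ (PySem.Set.empty : PySem.Set (List Char)) := by
    rintro ⟨i, _, hm⟩; exact absurd hm (List.not_mem_nil)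
  rw [pv_dup_iff]
  tauto

lemma pv_fold_first (a : List Char) (k : Nat) :
    (PySem.List.pyRange (k : Int) 0 (-1)).foldl
      (fun m l => if pvCA a l then max m l else m) 0 = pvFirstA a k := by
  induction k with
  | zero => rw [PySem.List.pyRange_neg_one_eq_nil (by norm_num)]; rfl
  | succ k ih =>
      rw [PySem.List.pyRange_neg_one_cons (by exact_mod_cast Nat.succ_pos k)]
      have hcast : ((k + 1 : Nat) : Int) - 1 = (k : Int) := by push_cast; ring
      simp only [List.foldl_cons, hcast]
      by_cases h : pvCA a ((k + 1 : Nat) : Int)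
      · have h' : pvCA a ((k : Int) + 1) = true := by
          have hc2 : ((k + 1 : Nat) : Int) = (k : Int) + 1 := by push_cast; ring
          rwa [hc2] at h
        rw [if_pos h]
        have hmax : max (0 : Int) ((k + 1 : Nat) : Int) = ((k + 1 : Nat) : Int) := by
          apply max_eq_right; positivity
        rw [hmax, pv_foldl_absorb]
        · simp only [pvFirstA, h', if_true]; push_cast; ring
        · intro l hl
          rw [PySem.List.mem_pyRange_neg_one] at hl
          omega
      · have h' : pvCA a ((k : Int) + 1) = false := by
          have hc2 : ((k + 1 : Nat) : Int) = (k : Int) + 1 := by push_cast; ring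
          rw [← hc2]; exact Bool.eq_false_iff.mpr h
        rw [if_neg h, ih]
        simp [pvFirstA, h']

lemma pv_first_eq (a : List Char) (k : Nat) :
    PySem.Int.toStr (pvFirstA a k) = pvBOuter a k := by
  induction k with
  | zero => simp only [pvFirstA, pvBOuter]; rfl
  | succ k ih =>
      simp only [pvFirstA, pvBOuter]
      have hc : pvCA a ((k : Int) + 1) = pvCB a (k + 1) := by
        have h := pv_cond_eq a (k + 1) (by omega)
        have hcast : ((k + 1 : Nat) : Int) = (k : Int) + 1 := by push_cast; ring
        rwa [hcast] at h
      rw [hc]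
      rw [show pvBInner a (k + 1) (List.range (a.length - (k + 1) + 1)) PySem.Set.empty
            = pvCB a (k + 1) from rfl]
      by_cases h : pvCB a (k + 1)
      · simp [h]
      · simp [h, ih]

lemma pv_main (a : List Char) :
    PySem.Int.toStr
      ((PySem.List.pyRange ((a.length : Int) - 1) 0 (-1)).foldl
        (fun m l =>
          (PySem.List.pyRange 0 ((a.length : Int) - l) 1).foldl
            (fun m s =>
              if PySem.Chars.isIn (PySem.List.slice a (some s) (some (s + l)))
                  (PySem.List.slice a (some (s + 1)) none)
              then max m l else m) m) 0)
      = pvBOuter a (a.length - 1) := by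
  have hfun : (fun (m l : Int) =>
      (PySem.List.pyRange 0 ((a.length : Int) - l) 1).foldl (fun m s =>
        if PySem.Chars.isIn (PySem.List.slice a (some s) (some (s + l)))
            (PySem.List.slice a (some (s + 1)) none)
        then max m l else m) m)
      = fun (m l : Int) => if pvCA a l then max m l else m := by
    funext m l
    exact pv_foldl_max_if _ _ l m
  rw [hfun]
  rcases Nat.eq_zero_or_pos a.length with h0 | hpos
  · rw [h0]
    norm_num
    simp only [pvBOuter]
    decide
  · have hcast : (a.length : Int) - 1 = ((a.length - 1 : Nat) : Int) := by
      have h1 : 1 ≤ a.length := hpos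
      push_cast [h1]; ring
    rw [hcast, pv_fold_first, pv_first_eq]

-- ===== VERDICT (by name: the statement is the Claim_ definition above) =====
theorem func_sol_spec : Claim_equal_func_sol := by
  intro raw_data _
  show func_sol raw_data = func_sol_alt raw_data
  show PySem.Int.toStr
      ((PySem.List.pyRange (((PySem.Str.strip raw_data).toList.length : Int) - 1) 0 (-1)).foldl
        (fun m l =>
          (PySem.List.pyRange 0 (((PySem.Str.strip raw_data).toList.length : Int) - l) 1).foldl
            (fun m s =>
              if PySem.Chars.isIn
                  (PySem.List.slice (PySem.Str.strip raw_data).toList (some s) (some (s + l)))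
                  (PySem.List.slice (PySem.Str.strip raw_data).toList (some (s + 1)) none)
              then max m l else m) m) 0)
      = pvBOuter (PySem.Str.strip raw_data).toList ((PySem.Str.strip raw_data).toList.length - 1)
  exact pv_main (PySem.Str.strip raw_data).toList
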